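-- pv_equiv track=rewrite | github.com/HaymayndzUltra/SuperTemplate | AI-project-workflow/scripts/ai/generate_success_metrics.py | _determine_reporting_frequency
-- ===== SOURCE A (Python) =====
-- from typing import Dict, List, Optional, Any
--
-- def _determine_reporting_frequency(business_goals: List[str]) -> str:
--     """Determine appropriate reporting frequency"""
--     if any('real-time' in goal.lower() or 'immediate' in goal.lower()
--            for goal in business_goals):
--         return "real-time"
--     elif any('daily' in goal.lower() for goal in business_goals):
--         return "daily"
--     elif any('weekly' in goal.lower() for goal in business_goals):
--         return "weekly"
--     else:
--         return "weekly"  # Default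
-- ===== SOURCE B (Python) =====
-- def _determine_reporting_frequency(business_goals):
--     """Determine appropriate reporting frequency (single pass)."""
--     has_daily = False
--     for goal in business_goals:
--         g = goal.lower()
--         if 'real-time' in g or 'immediate' in g:
--             return "real-time"
--         elif 'daily' in g:
--             has_daily = True
--     return "daily" if has_daily else "weekly"
-- ===== Notes on version B (the rewrite author's own statement) =====
-- stated objective: simpler
-- what changed: Replaced three separate any() scans (with a dead weekly branch) by one loop that lowercases each goal once, returns 'real-time' immediately on match and carries a has_daily flag; one pass and one lower() per goal instead of up to three.
import Mathlib
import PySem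

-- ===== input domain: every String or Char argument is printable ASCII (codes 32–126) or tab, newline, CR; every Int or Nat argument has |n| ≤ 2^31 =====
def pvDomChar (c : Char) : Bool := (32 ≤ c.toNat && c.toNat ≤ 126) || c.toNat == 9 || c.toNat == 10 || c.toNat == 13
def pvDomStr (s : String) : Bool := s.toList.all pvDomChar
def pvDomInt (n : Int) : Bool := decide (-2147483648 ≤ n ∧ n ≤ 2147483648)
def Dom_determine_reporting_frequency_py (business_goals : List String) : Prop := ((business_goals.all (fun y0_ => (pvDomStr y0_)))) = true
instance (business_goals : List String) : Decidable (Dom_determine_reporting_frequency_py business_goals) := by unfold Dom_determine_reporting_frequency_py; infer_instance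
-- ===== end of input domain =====

-- B replaces A's three any() scans (with a dead weekly branch) by one early-returning pass with a daily flag; objective: simpler.

-- ===== PORT A =====
def determine_reporting_frequency_py (business_goals : List String) : String :=
  if business_goals.any (fun goal =>
      PySem.Str.isIn "real-time" (PySem.Str.lower goal) || PySem.Str.isIn "immediate" (PySem.Str.lower goal)) then
    "real-time"
  else if business_goals.any (fun goal => PySem.Str.isIn "daily" (PySem.Str.lower goal)) then
    "daily"
  else if business_goals.any (fun goal => PySem.Str.isIn "weekly" (PySem.Str.lower goal)) then
    "weekly"
  else
    "weekly"

-- ===== PORT B =====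
def drfAltLoop : List String → Bool → String
  | [], hasDaily => if hasDaily then "daily" else "weekly"
  | goal :: rest, hasDaily =>
    let g := PySem.Str.lower goal
    if PySem.Str.isIn "real-time" g || PySem.Str.isIn "immediate" g then "real-time"
    else drfAltLoop rest (hasDaily || PySem.Str.isIn "daily" g)

def determine_reporting_frequency_py_alt (business_goals : List String) : String :=
  drfAltLoop business_goals false

-- ===== PRECONDITION & SPEC =====
def Spec_determine_reporting_frequency_py (business_goals : List String) (out : String) : Prop := out = determine_reporting_frequency_py_alt business_goals
instance (business_goals : List String) (out : String) : Decidable (Spec_determine_reporting_frequency_py business_goals out) := by unfold Spec_determine_reporting_frequency_py; infer_instance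

-- ===== CLAIM (what is proved, stated in full; the proofs are below) =====
def Claim_equal_determine_reporting_frequency_py : Prop := ∀ (business_goals : List String), Dom_determine_reporting_frequency_py business_goals → Spec_determine_reporting_frequency_py business_goals (determine_reporting_frequency_py business_goals)

-- ===== LEMMAS AND PROOFS =====
theorem drfAltLoop_eq (gs : List String) (flag : Bool) :
    drfAltLoop gs flag =
      if gs.any (fun goal => PySem.Str.isIn "real-time" (PySem.Str.lower goal) || PySem.Str.isIn "immediate" (PySem.Str.lower goal)) then "real-time"
      else if flag || gs.any (fun goal => PySem.Str.isIn "daily" (PySem.Str.lower goal)) then "daily"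
      else "weekly" := by
  induction gs generalizing flag with
  | nil => simp [drfAltLoop]
  | cons g rest ih =>
    simp only [drfAltLoop, List.any_cons]
    cases h1 : (PySem.Str.isIn "real-time" (PySem.Str.lower g) || PySem.Str.isIn "immediate" (PySem.Str.lower g)) with
    | true => simp only [Bool.true_or, if_true]
    | false =>
      rw [if_neg (by simp), ih, Bool.or_assoc]
      rfl


-- ===== VERDICT (by name: the statement is the Claim_ definition above) =====
theorem determine_reporting_frequency_py_spec : Claim_equal_determine_reporting_frequency_py := by
  intro gs _
  unfold Spec_determine_reporting_frequency_py determine_reporting_frequency_py determine_reporting_frequency_py_alt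
  rw [drfAltLoop_eq]
  simp only [Bool.false_or]
  split_ifs <;> rfl
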